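-- pv_equiv track=rewrite | github.com/ehsansobhani/reserach_engin | research_project/workflows/generate_latex.py | _protect_math
-- ===== SOURCE A (Python) =====
-- def _protect_math(text: str) -> tuple[str, list[str]]:
--     """Extract $...$ and $$...$$ spans; replace with placeholders."""
--     placeholders: list[str] = []
--     result = []
--     i = 0
--     while i < len(text):
--         if text[i] == "$":
--             # Check for $$
--             if text[i:i+2] == "$$":
--                 end = text.find("$$", i + 2)
--                 if end != -1:
--                     span = text[i:end+2]
--                     placeholders.append(span)
--                     result.append(f"\x00MATH{len(placeholders)-1}\x00")
--                     i = end + 2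
--                     continue
--             else:
--                 end = text.find("$", i + 1)
--                 if end != -1:
--                     span = text[i:end+1]
--                     placeholders.append(span)
--                     result.append(f"\x00MATH{len(placeholders)-1}\x00")
--                     i = end + 1
--                     continue
--         result.append(text[i])
--         i += 1
--     return "".join(result), placeholders
-- ===== SOURCE B (Python) =====
-- import re
--
-- _MATH_RE = re.compile(r"\$\$.*?\$\$|\$[^$]+\$", re.DOTALL)
--
--
-- def _protect_math(text: str) -> tuple[str, list[str]]:
--     """Extract $...$ and $$...$$ spans; replace with placeholders."""
--     placeholders: list[str] = []
--
--     def stash(m: re.Match) -> str: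
--         placeholders.append(m.group(0))
--         return f"\x00MATH{len(placeholders) - 1}\x00"
--
--     return _MATH_RE.sub(stash, text), placeholders
-- ===== Notes on version B (the rewrite author's own statement) =====
-- stated objective: idiomatic
-- what changed: Replaces A's manual index loop with str.find re-scans by a single re.sub over the compiled pattern r'\$\$.*?\$\$|\$[^$]+\$' (DOTALL) whose callback stashes each matched span and returns its placeholder.
import Mathlib
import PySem

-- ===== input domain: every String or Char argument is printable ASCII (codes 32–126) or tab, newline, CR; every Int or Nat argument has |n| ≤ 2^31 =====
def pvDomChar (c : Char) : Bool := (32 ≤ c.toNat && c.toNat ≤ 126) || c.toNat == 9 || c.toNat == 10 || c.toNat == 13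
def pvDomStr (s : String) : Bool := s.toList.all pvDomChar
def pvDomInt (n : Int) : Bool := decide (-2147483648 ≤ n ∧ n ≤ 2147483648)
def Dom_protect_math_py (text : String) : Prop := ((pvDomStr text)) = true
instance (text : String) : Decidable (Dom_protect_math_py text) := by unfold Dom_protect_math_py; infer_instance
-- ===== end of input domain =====

-- B replaces A's manual index loop (with str.find re-scans) by a single re.sub over
-- the pattern r"\$\$.*?\$\$|\$[^$]+\$" (DOTALL) with a span-stashing callback;
-- objective: idiomatic.

-- ===== PORT A =====
-- Literal port of A's while-loop: state (i, result, placeholders); fuel (text.length+1)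
-- only makes the recursion total — i grows by at least 1 per iteration, so it never runs out.
def pvALoop (t : List Char) : Nat → Int → List (List Char) → List (List Char) →
    (List (List Char) × List (List Char))
  | 0, _, result, phs => (result, phs)
  | fuel+1, i, result, phs =>
    if i < (t.length : Int) then
      -- text[i]: i is in range here (0 ≤ i < len), so the .getD default is never used
      if (PySem.List.pyGet? t i).getD '\x00' = '$' then
        if PySem.Chars.slice t (some i) (some (i+2)) = ['$','$'] then
          -- end = text.find("$$", i + 2)
          let e := PySem.Chars.findFrom t ['$','$'] (i+2) none
          if e ≠ -1 then
            let span := PySem.Chars.slice t (some i) (some (e+2))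
            let phs' := phs ++ [span]
            pvALoop t fuel (e+2)
              (result ++ ['\x00' :: 'M' :: 'A' :: 'T' :: 'H' ::
                (PySem.Int.toChars ((phs'.length : Int) - 1) ++ ['\x00'])]) phs'
          else pvALoop t fuel (i+1) (result ++ [[(PySem.List.pyGet? t i).getD '\x00']]) phs
        else
          -- end = text.find("$", i + 1)
          let e := PySem.Chars.findFrom t ['$'] (i+1) none
          if e ≠ -1 then
            let span := PySem.Chars.slice t (some i) (some (e+1))
            let phs' := phs ++ [span]
            pvALoop t fuel (e+1)
              (result ++ ['\x00' :: 'M' :: 'A' :: 'T' :: 'H' ::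
                (PySem.Int.toChars ((phs'.length : Int) - 1) ++ ['\x00'])]) phs'
          else pvALoop t fuel (i+1) (result ++ [[(PySem.List.pyGet? t i).getD '\x00']]) phs
      else pvALoop t fuel (i+1) (result ++ [[(PySem.List.pyGet? t i).getD '\x00']]) phs
    else (result, phs)

def protect_math_py (text : String) : String × List String :=
  let t := text.toList
  let r := pvALoop t (t.length + 1) 0 [] []
  (String.ofList (PySem.Chars.join [] r.1), r.2.map String.ofList)

-- ===== PORT B =====
-- Lean has no regex engine, so Source B's compiled pattern r"\$\$.*?\$\$|\$[^$]+\$"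
-- (re.DOTALL) and re.sub's left-to-right non-overlapping scan are transcribed by
-- hand, exactly: pvDDClose is the non-greedy ".*?\$\$" (split at the FIRST "$$"),
-- pvSingle is "[^$]+\$", pvMatch the alternation after the leading "$",
-- pvSub the sub scan with the placeholder-stashing callback.

-- f"\x00MATH{n}\x00"
def pvPhChunk (n : Nat) : List Char :=
  '\x00' :: 'M' :: 'A' :: 'T' :: 'H' :: (PySem.Int.toChars (n : Int) ++ ['\x00'])

-- non-greedy ".*?\$\$": split cs at the first "$$" into (content, rest after it)
def pvDDClose : List Char → Option (List Char × List Char)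
  | [] => none
  | c :: cs =>
    if c = '$' ∧ cs.head? = some '$' then some ([], cs.tail)
    else (pvDDClose cs).map (fun p => (c :: p.1, p.2))

-- "[^$]+\$": a nonempty run of non-'$' characters closed by a '$'
def pvSingle (cs : List Char) : Option (List Char × List Char) :=
  if cs.takeWhile (· ≠ '$') ≠ [] ∧ (cs.drop (cs.takeWhile (· ≠ '$')).length).head? = some '$' then
    some (cs.takeWhile (· ≠ '$'), (cs.drop (cs.takeWhile (· ≠ '$')).length).tail)
  else none

-- the alternation, attempted at the current position: (matched span, rest)
def pvMatch : List Char → Option (List Char × List Char)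
  | [] => none
  | c :: cs =>
    if c = '$' then
      match (if cs.head? = some '$' then pvDDClose cs.tail else none) with
      | some (content, rest) => some ('$' :: '$' :: content ++ ['$','$'], rest)
      | none =>
        match pvSingle cs with
        | some (body, rest) => some ('$' :: body ++ ['$'], rest)
        | none => none
    else none

-- shape lemmas (the port's recursion cites pvMatch_rest_lt for termination)
theorem pvDDClose_shape (cs ct r : List Char) (h : pvDDClose cs = some (ct, r)) :
    cs = ct ++ '$' :: '$' :: r := by
  induction cs generalizing ct r with
  | nil => simp [pvDDClose] at h
  | cons c cs ih =>
    rw [pvDDClose] at h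
    split at h
    · rename_i hc
      obtain ⟨hc1, hc2⟩ := hc
      rcases cs with _ | ⟨x, xs⟩
      · simp at hc2
      · simp at hc2 h
        obtain ⟨h1, h2⟩ := h
        simp [hc1, hc2, ← h1, ← h2]
    · simp only [Option.map_eq_some_iff] at h
      obtain ⟨⟨ct', r'⟩, hsc, hpr⟩ := h
      simp at hpr
      obtain ⟨h1, h2⟩ := hpr
      simp [← h1, ← h2, ih ct' r' hsc]

theorem pvDropTake (cs : List Char) :
    cs.drop (cs.takeWhile (· ≠ '$')).length = cs.dropWhile (· ≠ '$') := by
  induction cs with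
  | nil => rfl
  | cons c cs ih =>
    by_cases hc : c = '$'
    · simp [List.takeWhile_cons, List.dropWhile_cons, hc]
    · simp [List.takeWhile_cons, List.dropWhile_cons, hc]
      simpa using ih

theorem pvSingle_shape (cs body r : List Char) (h : pvSingle cs = some (body, r)) :
    cs = body ++ '$' :: r ∧ body ≠ [] ∧ '$' ∉ body := by
  unfold pvSingle at h
  split at h
  · rename_i hcond
    obtain ⟨hne, hhd⟩ := hcond
    simp only [Option.some.injEq, Prod.mk.injEq] at h
    obtain ⟨h1, h2⟩ := h
    rw [pvDropTake] at hhd h2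
    have hdcons : cs.dropWhile (· ≠ '$') = '$' :: (cs.dropWhile (· ≠ '$')).tail := by
      rcases hd : cs.dropWhile (· ≠ '$') with _ | ⟨y, ys⟩
      · rw [hd] at hhd; simp at hhd
      · rw [hd] at hhd; simp at hhd; simp [hhd]
    refine ⟨?_, h1 ▸ hne, ?_⟩
    · conv_lhs => rw [← List.takeWhile_append_dropWhile (p := (· ≠ '$')) (l := cs)]
      rw [hdcons, ← h1, ← h2]
    · rw [← h1]
      intro hmem
      have := List.mem_takeWhile_imp hmem
      simp at this
  · simp at h

theorem pvMatch_rest_lt (c : Char) (cs span rest : List Char)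
    (h : pvMatch (c :: cs) = some (span, rest)) : rest.length < (c :: cs).length := by
  rw [pvMatch] at h
  split at h
  · split at h
    · rename_i content r heq
      split at heq
      · have hsh := pvDDClose_shape cs.tail content r heq
        have hlen := congrArg List.length hsh
        have htl : cs.tail.length ≤ cs.length := by
          rcases cs with _ | ⟨x, xs⟩ <;> simp
        simp only [Option.some.injEq, Prod.mk.injEq] at h
        obtain ⟨-, h2⟩ := h
        subst h2
        simp at hlen ⊢
        omega
      · simp at heq
    · split at h
      · rename_i body r heq
        obtain ⟨hsh, hne, -⟩ := pvSingle_shape cs body r heq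
        have hlen := congrArg List.length hsh
        simp only [Option.some.injEq, Prod.mk.injEq] at h
        obtain ⟨-, h2⟩ := h
        subst h2
        simp at hlen ⊢
        omega
      · simp at h
  · simp at h

-- re.sub's scan: at each position try the pattern; on a match stash the span,
-- emit the placeholder and continue after the match, else copy one character
def pvSub : List Char → Nat → (List Char × List (List Char))
  | [], _ => ([], [])
  | c :: cs, n =>
    match h : pvMatch (c :: cs) with
    | some (span, rest) =>
      let pr := pvSub rest (n + 1)
      (pvPhChunk n ++ pr.1, span :: pr.2)
    | none =>
      let pr := pvSub cs n
      (c :: pr.1, pr.2)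
  termination_by cs _ => cs.length
  decreasing_by
  · exact pvMatch_rest_lt c cs span rest h
  · simp

def protect_math_py_alt (text : String) : String × List String :=
  let r := pvSub text.toList 0
  (String.ofList r.1, r.2.map String.ofList)

-- ===== PRECONDITION & SPEC =====
def Spec_protect_math_py (text : String) (out : String × List String) : Prop := out = protect_math_py_alt text
instance (text : String) (out : String × List String) : Decidable (Spec_protect_math_py text out) := by unfold Spec_protect_math_py; infer_instance

-- ===== CLAIM (what is proved, stated in full; the proofs are below) =====
def Claim_equal_protect_math_py : Prop := ∀ (text : String), Dom_protect_math_py text → Spec_protect_math_py text (protect_math_py text)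

-- ===== LEMMAS AND PROOFS =====

-- Common reference recursion: A's scan written as structural recursion on the
-- remaining suffix, with a flattened output and a running placeholder counter.
def pvRec : List Char → Nat → (List Char × List (List Char))
  | [], _ => ([], [])
  | c :: cs, n =>
    if c = '$' then
      if cs.head? = some '$' then
        let j := PySem.Chars.find cs.tail ['$','$']
        if j = -1 then
          let pr := pvRec cs n
          ('$' :: pr.1, pr.2)
        else
          let pr := pvRec (cs.tail.drop (j.toNat + 2)) (n+1)
          (pvPhChunk n ++ pr.1, ('$' :: '$' :: cs.tail.take j.toNat ++ ['$','$']) :: pr.2)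
      else
        let j := PySem.Chars.find cs ['$']
        if j = -1 then
          let pr := pvRec cs n
          ('$' :: pr.1, pr.2)
        else
          let pr := pvRec (cs.drop (j.toNat + 1)) (n+1)
          (pvPhChunk n ++ pr.1, ('$' :: cs.take j.toNat ++ ['$']) :: pr.2)
    else
      let pr := pvRec cs n
      (c :: pr.1, pr.2)
  termination_by cs _ => cs.length
  decreasing_by all_goals simp_wf

theorem pvDropWhileDollar (cs : List Char) (hmem : '$' ∈ cs) :
    (cs.dropWhile (· ≠ '$')).head? = some '$' := by
  induction cs with
  | nil => simp at hmem
  | cons c cs ih =>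
    by_cases hc : c = '$'
    · simp [List.dropWhile_cons, hc]
    · have hm2 : '$' ∈ cs := by
        rcases List.mem_cons.mp hmem with h | h
        · exact absurd h.symm hc
        · exact h
      simp [List.dropWhile_cons, hc]
      simpa using ih hm2

-- find.go with offset k
theorem pvFindGo (l sub : List Char) (k : Nat) : PySem.Chars.find.go sub l k =
    if PySem.Chars.find l sub = -1 then -1 else (k : Int) + PySem.Chars.find l sub := by
  induction l generalizing k with
  | nil =>
    rw [PySem.Chars.find, PySem.Chars.find.go, PySem.Chars.find.go]
    cases hsub : sub.isEmpty <;> simp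
  | cons c l ih =>
    have h0 : PySem.Chars.find.go sub (c :: l) k =
        if sub.isPrefixOf (c :: l) then (k : Int) else PySem.Chars.find.go sub l (k + 1) := rfl
    have h1 : PySem.Chars.find (c :: l) sub =
        if sub.isPrefixOf (c :: l) then (0 : Int) else PySem.Chars.find.go sub l (0 + 1) := rfl
    by_cases hpref : sub.isPrefixOf (c :: l) = true
    · have hf : PySem.Chars.find (c :: l) sub = 0 := by rw [h1, if_pos hpref]
      rw [h0, if_pos hpref, hf]
      simp
    · have hf : PySem.Chars.find (c :: l) sub =
          if PySem.Chars.find l sub = -1 then -1 else 1 + PySem.Chars.find l sub := by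
        rw [h1, if_neg hpref, ih (0+1)]
        norm_num
      rw [h0, if_neg hpref, ih (k+1), hf]
      by_cases hfl : PySem.Chars.find l sub = -1
      · simp [hfl]
      · have hge := PySem.Chars.neg_one_le_find l sub
        rw [if_neg hfl, if_neg hfl, if_neg (by omega)]
        push_cast
        ring

theorem pvFindCons (c : Char) (l sub : List Char) : PySem.Chars.find (c :: l) sub =
    if sub.isPrefixOf (c :: l) then 0
    else if PySem.Chars.find l sub = -1 then -1 else 1 + PySem.Chars.find l sub := by
  have h0 : PySem.Chars.find (c :: l) sub =
      if sub.isPrefixOf (c :: l) then (0 : Int) else PySem.Chars.find.go sub l (0 + 1) := by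
    rfl
  rw [h0]
  by_cases hpref : sub.isPrefixOf (c :: l) = true
  · simp [hpref]
  · simp only [Bool.not_eq_true] at hpref
    rw [hpref]
    simp only [Bool.false_eq_true, if_false]
    rw [pvFindGo l sub 1]
    simp

theorem pvFindAppend (p l ds : List Char) (hp : '$' ∉ p) :
    PySem.Chars.find (p ++ l) ('$' :: ds) =
      if PySem.Chars.find l ('$' :: ds) = -1 then -1
      else (p.length : Int) + PySem.Chars.find l ('$' :: ds) := by
  induction p with
  | nil =>
    by_cases hfl : PySem.Chars.find l ('$' :: ds) = -1 <;> simp [hfl]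
  | cons c p ih =>
    have hc : c ≠ '$' := fun h => hp (by simp [h])
    have hp' : '$' ∉ p := fun h => hp (by simp [h])
    rw [List.cons_append, pvFindCons]
    have hpref : List.isPrefixOf ('$' :: ds) (c :: (p ++ l)) = false := by
      simp [List.isPrefixOf]
      exact fun hcc => absurd hcc (Ne.symm hc)
    rw [hpref]
    simp only [Bool.false_eq_true, if_false]
    rw [ih hp']
    by_cases hfl : PySem.Chars.find l ('$' :: ds) = -1
    · simp [hfl]
    · have h0 : 0 ≤ PySem.Chars.find l ('$' :: ds) := by
        have := PySem.Chars.neg_one_le_find l ('$' :: ds)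
        omega
      rw [if_neg hfl, if_neg (by push_cast; omega), if_neg hfl]
      push_cast [List.length_cons]
      ring

theorem pvFindFree (p ds : List Char) (hp : '$' ∉ p) : PySem.Chars.find p ('$' :: ds) = -1 := by
  rw [PySem.Chars.find_eq_neg_one_iff]
  intro hinf
  exact hp (hinf.sublist.subset (by simp))

-- pvDDClose against find: found case and not-found case
theorem pvDDClose_find (cs ct r : List Char) (h : pvDDClose cs = some (ct, r)) :
    PySem.Chars.find cs ['$','$'] = (ct.length : Int) := by
  induction cs generalizing ct r with
  | nil => simp [pvDDClose] at h
  | cons c cs ih =>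
    rw [pvDDClose] at h
    split at h
    · rename_i hc
      obtain ⟨hc1, hc2⟩ := hc
      simp only [Option.some.injEq, Prod.mk.injEq] at h
      rcases cs with _ | ⟨x, xs⟩
      · simp at hc2
      · simp at hc2
        rw [pvFindCons]
        have : List.isPrefixOf ['$','$'] (c :: x :: xs) = true := by
          simp [List.isPrefixOf, hc1, hc2]
        rw [this]
        simp [← h.1]
    · rename_i hc
      simp only [Option.map_eq_some_iff] at h
      obtain ⟨⟨ct', r'⟩, hsc, hpr⟩ := h
      simp at hpr
      obtain ⟨h1, h2⟩ := hpr
      have hfind := ih ct' r' hsc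
      rw [pvFindCons]
      have hpref : List.isPrefixOf ['$','$'] (c :: cs) = false := by
        rcases cs with _ | ⟨x, xs⟩
        · simp [List.isPrefixOf]
        · simp [List.isPrefixOf]
          intro h' hx'
          exact hc ⟨h'.symm, by simp [show x = '$' from hx'.symm]⟩
      rw [hpref]
      simp only [Bool.false_eq_true, if_false]
      rw [hfind, if_neg (by omega), ← h1]
      simp
      ring

theorem pvDDClose_none (cs : List Char) (h : pvDDClose cs = none) :
    PySem.Chars.find cs ['$','$'] = -1 := by
  induction cs with
  | nil => rfl
  | cons c cs ih =>
    rw [pvDDClose] at h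
    split at h
    · simp at h
    · rename_i hc
      simp only [Option.map_eq_none_iff] at h
      rw [pvFindCons]
      have hpref : List.isPrefixOf ['$','$'] (c :: cs) = false := by
        rcases cs with _ | ⟨x, xs⟩
        · simp [List.isPrefixOf]
        · simp [List.isPrefixOf]
          intro h' hx'
          exact hc ⟨h'.symm, by simp [show x = '$' from hx'.symm]⟩
      rw [hpref]
      simp [ih h]

theorem pvSingle_none_find (cs : List Char) (h : pvSingle cs = none)
    (hh : cs.head? ≠ some '$') : PySem.Chars.find cs ['$'] = -1 := by
  unfold pvSingle at h
  split at h
  · simp at h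
  · rename_i hcond
    rw [not_and_or] at hcond
    refine pvFindFree cs [] ?_
    intro hmem
    have hdollar := pvDropWhileDollar cs hmem
    rcases hcond with hbody | hhd2
    · simp only [ne_eq, not_not] at hbody
      rcases cs with _ | ⟨x, xs⟩
      · simp at hmem
      · by_cases hx : x = '$'
        · exact hh (by simp [hx])
        · rw [List.takeWhile_cons] at hbody
          simp [hx] at hbody
    · rw [pvDropTake] at hhd2
      exact hhd2 hdollar

theorem pvTakeAt (l sub : List Char) (j : Nat) (h : sub <+: l.drop j) (hj : j ≤ l.length) :
    l.take (j + sub.length) = l.take j ++ sub := by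
  obtain ⟨u, hu⟩ := h
  have hl : l = l.take j ++ (sub ++ u) := by
    rw [hu]
    simp
  have hlen : (l.take j).length = j := by
    simp [hj]
  conv_lhs => rw [hl]
  rw [List.take_append, hlen]
  rw [List.take_of_length_le (by omega)]
  have h2 : j + sub.length - j = sub.length := by omega
  rw [h2]
  have h3 : (sub ++ u).take sub.length = sub := by
    rw [List.take_append]
    simp
  rw [h3]

theorem pvHeadTake (l : List Char) : l.take 1 = ['$'] ↔ l.head? = some '$' := by
  rcases l with _ | ⟨x, xs⟩ <;> simp

-- A's fuelled index loop computes pvRec on the remaining suffix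
theorem pvALoopRec (t : List Char) (fuel iN : Nat) (result phs : List (List Char))
    (hi : iN ≤ t.length) (hf : t.length - iN < fuel) :
    (pvALoop t fuel (iN : Int) result phs).1.flatten
        = result.flatten ++ (pvRec (t.drop iN) phs.length).1 ∧
      (pvALoop t fuel (iN : Int) result phs).2 = phs ++ (pvRec (t.drop iN) phs.length).2 := by
  induction fuel generalizing iN result phs with
  | zero => omega
  | succ f ih =>
    rw [pvALoop]
    by_cases hlt : iN < t.length
    case neg =>
      rw [if_neg (by exact_mod_cast hlt)]
      rw [List.drop_eq_nil_of_le (by omega)]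
      simp [pvRec]
    case pos =>
      rw [if_pos (by exact_mod_cast hlt)]
      have hget : (PySem.List.pyGet? t (iN : Int)).getD '\x00' = t[iN] := by
        rw [PySem.List.pyGet?_natCast, List.getElem?_eq_getElem hlt]
        rfl
      have hdrop : t.drop iN = t[iN] :: t.drop (iN+1) := List.drop_eq_getElem_cons hlt
      by_cases hc : t[iN] = '$'
      · rw [if_pos (by rw [hget]; exact hc)]
        have hslice : PySem.Chars.slice t (some (iN : Int)) (some ((iN : Int)+2)) = (t.drop iN).take 2 := by
          have h2 : ((iN : Int) + 2) = ((iN + 2 : Nat) : Int) := by push_cast; ring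
          rw [h2, PySem.Chars.slice_eq_listSlice, PySem.List.slice_natCast]
          congr 1
          omega
        by_cases hd2 : (t.drop (iN+1)).head? = some '$'
        · -- "$$" at position iN
          have hiN1 : iN + 1 < t.length := by
            rcases hh : t.drop (iN+1) with _ | ⟨y, ys⟩
            · rw [hh] at hd2; simp at hd2
            · have := congrArg List.length hh
              simp at this
              omega
          have hdrop2 : t.drop (iN+1) = '$' :: t.drop (iN+2) := by
            have hcons := List.drop_eq_getElem_cons hiN1
            have hval : t[iN+1] = '$' := by
              rw [hcons] at hd2
              simp [List.getElem?_eq_getElem hiN1] at hd2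
              exact hd2
            rw [hcons, hval]
          have hsl2 : PySem.Chars.slice t (some (iN : Int)) (some ((iN : Int)+2)) = ['$','$'] := by
            rw [hslice, hdrop, hdrop2]
            simp [hc]
          rw [if_pos hsl2]
          have hk2 : iN + 2 ≤ t.length := by omega
          have hff : PySem.Chars.findFrom t ['$','$'] ((iN : Int)+2) none =
              if PySem.Chars.find (t.drop (iN+2)) ['$','$'] = -1 then -1
              else ((iN + 2 : Nat) : Int) + PySem.Chars.find (t.drop (iN+2)) ['$','$'] := by
            have h2 : ((iN : Int) + 2) = ((iN + 2 : Nat) : Int) := by push_cast; ring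
            rw [h2]
            exact PySem.Chars.findFrom_natCast t ['$','$'] (iN+2) hk2
          have hrec : pvRec (t.drop iN) phs.length =
              (if PySem.Chars.find (t.drop (iN+2)) ['$','$'] = -1 then
                ('$' :: (pvRec (t.drop (iN+1)) phs.length).1, (pvRec (t.drop (iN+1)) phs.length).2)
              else
                (pvPhChunk phs.length ++ (pvRec ((t.drop (iN+2)).drop ((PySem.Chars.find (t.drop (iN+2)) ['$','$']).toNat + 2)) (phs.length+1)).1,
                  ('$' :: '$' :: (t.drop (iN+2)).take (PySem.Chars.find (t.drop (iN+2)) ['$','$']).toNat ++ ['$','$']) ::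
                    (pvRec ((t.drop (iN+2)).drop ((PySem.Chars.find (t.drop (iN+2)) ['$','$']).toNat + 2)) (phs.length+1)).2)) := by
            conv_lhs => rw [hdrop, pvRec]
            rw [if_pos hc]
            rw [if_pos hd2]
            simp only [List.tail_drop]
          by_cases hj : PySem.Chars.find (t.drop (iN+2)) ['$','$'] = -1
          · -- unclosed "$$": fall through to the single-character append
            have hffv : PySem.Chars.findFrom t ['$','$'] ((iN : Int)+2) none = -1 := by
              rw [hff, if_pos hj]
            rw [hffv]
            simp only [ne_eq, not_true_eq_false, if_false]
            have harg : (iN : Int) + 1 = ((iN + 1 : Nat) : Int) := by push_cast; ring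
            rw [harg]
            obtain ⟨ih1, ih2⟩ := ih (iN+1) (result ++ [[(PySem.List.pyGet? t (iN : Int)).getD '\x00']]) phs (by omega) (by omega)
            rw [hrec, if_pos hj]
            constructor
            · rw [ih1]
              simp [hget, hc, List.getElem?_eq_getElem hlt]
            · rw [ih2]
          · -- closing "$$" found
            have hj0 : 0 ≤ PySem.Chars.find (t.drop (iN+2)) ['$','$'] := by
              have := PySem.Chars.neg_one_le_find (t.drop (iN+2)) ['$','$']
              omega
            set j := PySem.Chars.find (t.drop (iN+2)) ['$','$'] with hjdef
            have hjn : j = (j.toNat : Int) := by omega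
            have hpref : ['$','$'] <+: (t.drop (iN+2)).drop j.toNat := by
              have := (PySem.Chars.find_spec (s := t.drop (iN+2)) (sub := ['$','$']) hj0).1
              rwa [← hjdef] at this
            have hjlen : j.toNat + 2 ≤ (t.drop (iN+2)).length := by
              obtain ⟨u, hu⟩ := hpref
              have := congrArg List.length hu
              simp at this
              simp only [List.length_drop]
              omega
            have hlen2 : (t.drop (iN+2)).length = t.length - (iN+2) := by simp
            have hffv : PySem.Chars.findFrom t ['$','$'] ((iN : Int)+2) none = ((iN + 2 : Nat) : Int) + j := by
              rw [hff, if_neg hj]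
            rw [hffv, if_pos (show (((iN + 2 : Nat) : Int) + j) ≠ -1 by omega)]
            have he2 : ((iN + 2 : Nat) : Int) + j + 2 = ((iN + 4 + j.toNat : Nat) : Int) := by
              push_cast
              omega
            have hspan : PySem.Chars.slice t (some (iN : Int)) (some (((iN + 2 : Nat) : Int) + j + 2)) =
                '$' :: '$' :: ((t.drop (iN+2)).take j.toNat ++ ['$','$']) := by
              rw [he2]
              have hs := PySem.List.slice_natCast t iN (iN + 4 + j.toNat)
              simp only [PySem.Chars.slice_eq_listSlice] at *
              rw [hs]
              have h4 : iN + 4 + j.toNat - iN = (j.toNat + 2) + 2 := by omega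
              rw [h4]
              rw [hdrop, hdrop2]
              rw [List.take_succ_cons, List.take_succ_cons]
              congr 1
              congr 1
              have := pvTakeAt (t.drop (iN+2)) ['$','$'] j.toNat hpref (by omega)
              simpa using this
            rw [hspan]
            have harg : ((iN + 2 : Nat) : Int) + j + 2 = ((iN + 4 + j.toNat : Nat) : Int) := he2
            rw [harg]
            obtain ⟨ih1, ih2⟩ := ih (iN + 4 + j.toNat)
              (result ++ ['\x00' :: 'M' :: 'A' :: 'T' :: 'H' ::
                (PySem.Int.toChars ((((phs ++ ['$' :: '$' :: ((t.drop (iN+2)).take j.toNat ++ ['$','$'])]).length : Int)) - 1) ++ ['\x00'])])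
              (phs ++ ['$' :: '$' :: ((t.drop (iN+2)).take j.toNat ++ ['$','$'])])
              (by omega) (by omega)
            rw [ih1, ih2]
            have hdarg : t.drop (iN + 4 + j.toNat) = (t.drop (iN+2)).drop (j.toNat + 2) := by
              rw [List.drop_drop]
              congr 1
              omega
            have hchunk : '\x00' :: 'M' :: 'A' :: 'T' :: 'H' ::
                (PySem.Int.toChars ((((phs ++ ['$' :: '$' :: ((t.drop (iN+2)).take j.toNat ++ ['$','$'])]).length : Int)) - 1) ++ ['\x00'])
                = pvPhChunk phs.length := by
              have hlenx : ∀ (sp : List Char), (((phs ++ [sp]).length : Int)) - 1 = (phs.length : Int) := by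
                intro sp
                simp
              rw [hlenx]
              rfl
            rw [hrec, if_neg hj]
            rw [hdarg, hchunk]
            constructor
            · simp
            · simp
        · -- not "$$": single '$' branch
          have hsl2 : PySem.Chars.slice t (some (iN : Int)) (some ((iN : Int)+2)) ≠ ['$','$'] := by
            rw [hslice, hdrop]
            intro hcon
            have : (t.drop (iN+1)).take 1 = ['$'] := by
              rcases hh : t.drop (iN+1) with _ | ⟨y, ys⟩
              · rw [hh] at hcon; simp at hcon
              · rw [hh] at hcon
                simp at hcon
                simp [hh, hcon.2]
            exact hd2 ((pvHeadTake _).1 this)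
          rw [if_neg hsl2]
          have hk1 : iN + 1 ≤ t.length := by omega
          have hff : PySem.Chars.findFrom t ['$'] ((iN : Int)+1) none =
              if PySem.Chars.find (t.drop (iN+1)) ['$'] = -1 then -1
              else ((iN + 1 : Nat) : Int) + PySem.Chars.find (t.drop (iN+1)) ['$'] := by
            have h1 : ((iN : Int) + 1) = ((iN + 1 : Nat) : Int) := by push_cast; ring
            rw [h1]
            exact PySem.Chars.findFrom_natCast t ['$'] (iN+1) hk1
          have hrec : pvRec (t.drop iN) phs.length =
              (if PySem.Chars.find (t.drop (iN+1)) ['$'] = -1 then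
                ('$' :: (pvRec (t.drop (iN+1)) phs.length).1, (pvRec (t.drop (iN+1)) phs.length).2)
              else
                (pvPhChunk phs.length ++ (pvRec ((t.drop (iN+1)).drop ((PySem.Chars.find (t.drop (iN+1)) ['$']).toNat + 1)) (phs.length+1)).1,
                  ('$' :: (t.drop (iN+1)).take (PySem.Chars.find (t.drop (iN+1)) ['$']).toNat ++ ['$']) ::
                    (pvRec ((t.drop (iN+1)).drop ((PySem.Chars.find (t.drop (iN+1)) ['$']).toNat + 1)) (phs.length+1)).2)) := by
            conv_lhs => rw [hdrop, pvRec]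
            rw [if_pos hc, if_neg hd2]
          by_cases hj : PySem.Chars.find (t.drop (iN+1)) ['$'] = -1
          · have hffv : PySem.Chars.findFrom t ['$'] ((iN : Int)+1) none = -1 := by
              rw [hff, if_pos hj]
            rw [hffv]
            simp only [ne_eq, not_true_eq_false, if_false]
            have harg : (iN : Int) + 1 = ((iN + 1 : Nat) : Int) := by push_cast; ring
            rw [harg]
            obtain ⟨ih1, ih2⟩ := ih (iN+1) (result ++ [[(PySem.List.pyGet? t (iN : Int)).getD '\x00']]) phs (by omega) (by omega)
            rw [hrec, if_pos hj]
            constructor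
            · rw [ih1]
              simp [hget, hc, List.getElem?_eq_getElem hlt]
            · rw [ih2]
          · have hj0 : 0 ≤ PySem.Chars.find (t.drop (iN+1)) ['$'] := by
              have := PySem.Chars.neg_one_le_find (t.drop (iN+1)) ['$']
              omega
            set j := PySem.Chars.find (t.drop (iN+1)) ['$'] with hjdef
            have hpref : ['$'] <+: (t.drop (iN+1)).drop j.toNat := by
              have := (PySem.Chars.find_spec (s := t.drop (iN+1)) (sub := ['$']) hj0).1
              rwa [← hjdef] at this
            have hjlen : j.toNat + 1 ≤ (t.drop (iN+1)).length := by
              obtain ⟨u, hu⟩ := hpref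
              have := congrArg List.length hu
              simp at this
              simp only [List.length_drop]
              omega
            have hlen1 : (t.drop (iN+1)).length = t.length - (iN+1) := by simp
            have hffv : PySem.Chars.findFrom t ['$'] ((iN : Int)+1) none = ((iN + 1 : Nat) : Int) + j := by
              rw [hff, if_neg hj]
            rw [hffv, if_pos (show (((iN + 1 : Nat) : Int) + j) ≠ -1 by omega)]
            have he1 : ((iN + 1 : Nat) : Int) + j + 1 = ((iN + 2 + j.toNat : Nat) : Int) := by
              push_cast
              omega
            have hspan : PySem.Chars.slice t (some (iN : Int)) (some (((iN + 1 : Nat) : Int) + j + 1)) =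
                '$' :: ((t.drop (iN+1)).take j.toNat ++ ['$']) := by
              rw [he1]
              have hs := PySem.List.slice_natCast t iN (iN + 2 + j.toNat)
              simp only [PySem.Chars.slice_eq_listSlice] at *
              rw [hs]
              have h4 : iN + 2 + j.toNat - iN = (j.toNat + 1) + 1 := by omega
              rw [h4]
              rw [hdrop]
              rw [List.take_succ_cons]
              congr 1
              have := pvTakeAt (t.drop (iN+1)) ['$'] j.toNat hpref (by omega)
              simpa using this
            rw [hspan]
            rw [he1]
            obtain ⟨ih1, ih2⟩ := ih (iN + 2 + j.toNat)
              (result ++ ['\x00' :: 'M' :: 'A' :: 'T' :: 'H' ::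
                (PySem.Int.toChars ((((phs ++ ['$' :: ((t.drop (iN+1)).take j.toNat ++ ['$'])]).length : Int)) - 1) ++ ['\x00'])])
              (phs ++ ['$' :: ((t.drop (iN+1)).take j.toNat ++ ['$'])])
              (by omega) (by omega)
            rw [ih1, ih2]
            have hdarg : t.drop (iN + 2 + j.toNat) = (t.drop (iN+1)).drop (j.toNat + 1) := by
              rw [List.drop_drop]
              congr 1
              omega
            have hchunk : '\x00' :: 'M' :: 'A' :: 'T' :: 'H' ::
                (PySem.Int.toChars ((((phs ++ ['$' :: ((t.drop (iN+1)).take j.toNat ++ ['$'])]).length : Int)) - 1) ++ ['\x00'])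
                = pvPhChunk phs.length := by
              have hlenx : ∀ (sp : List Char), (((phs ++ [sp]).length : Int)) - 1 = (phs.length : Int) := by
                intro sp
                simp
              rw [hlenx]
              rfl
            rw [hrec, if_neg hj]
            rw [hdarg, hchunk]
            constructor
            · simp
            · simp
      · -- ordinary character
        rw [if_neg (by rw [hget]; exact hc)]
        have harg : (iN : Int) + 1 = ((iN + 1 : Nat) : Int) := by push_cast; ring
        rw [harg]
        obtain ⟨ih1, ih2⟩ := ih (iN+1) (result ++ [[(PySem.List.pyGet? t (iN : Int)).getD '\x00']]) phs (by omega) (by omega)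
        have hrec : pvRec (t.drop iN) phs.length =
            (t[iN] :: (pvRec (t.drop (iN+1)) phs.length).1, (pvRec (t.drop (iN+1)) phs.length).2) := by
          conv_lhs => rw [hdrop, pvRec]
          rw [if_neg hc]
        rw [hrec]
        constructor
        · rw [ih1]
          simp [hget, List.getElem?_eq_getElem hlt]
        · rw [ih2]

theorem pvJoinNil (l : List (List Char)) : PySem.Chars.join [] l = l.flatten := by
  show List.intercalate [] l = l.flatten
  induction l with
  | nil => rfl
  | cons a t ih =>
    rcases t with _ | ⟨b, t2⟩
    · simp [List.intercalate]
    · simp [List.intercalate, List.intersperse] at ih ⊢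
      simpa using ih

theorem pvA_eq_pvRec (text : String) :
    protect_math_py text = (String.ofList (pvRec text.toList 0).1,
      (pvRec text.toList 0).2.map String.ofList) := by
  unfold protect_math_py
  have h0 : ((0 : Nat) : Int) = (0 : Int) := rfl
  obtain ⟨h1, h2⟩ := pvALoopRec text.toList (text.toList.length + 1) 0 [] [] (by omega) (by omega)
  rw [h0] at h1 h2
  simp only [List.drop_zero, List.length_nil] at h1 h2
  show (String.ofList (PySem.Chars.join [] (pvALoop text.toList (text.toList.length + 1) 0 [] []).1),
      (pvALoop text.toList (text.toList.length + 1) 0 [] []).2.map String.ofList) = _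
  rw [pvJoinNil, h1, h2]
  simp

theorem pvDropApp {α : Type} (l1 l2 : List α) (k : Nat) : (l1 ++ l2).drop (l1.length + k) = l2.drop k := by
  simp [List.drop_append]

-- B's regex scan computes pvRec
theorem pvSub_eq_pvRec (cs : List Char) (n : Nat) : pvSub cs n = pvRec cs n := by
  match cs with
  | [] => simp [pvSub, pvRec]
  | c :: cs =>
    rw [pvSub, pvRec]
    by_cases hc : c = '$'
    case neg =>
      have hm : pvMatch (c :: cs) = none := by
        rw [pvMatch, if_neg hc]
      rw [if_neg hc]
      split
      · rename_i span rest heq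
        rw [hm] at heq
        simp at heq
      · exact congrArg (fun pr => (c :: pr.1, pr.2)) (pvSub_eq_pvRec cs n)
    case pos =>
      subst hc
      by_cases hd2 : cs.head? = some '$'
      · rw [if_pos rfl, if_pos hd2]
        match hdd : pvDDClose cs.tail with
        | some (ct, r) =>
          have hfind := pvDDClose_find cs.tail ct r hdd
          have hshape := pvDDClose_shape cs.tail ct r hdd
          have hm : pvMatch ('$' :: cs) = some ('$' :: '$' :: ct ++ ['$','$'], r) := by
            rw [pvMatch, if_pos rfl, if_pos hd2, hdd]
          rw [hfind, if_neg (by omega)]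
          have htake : cs.tail.take ((ct.length : Int)).toNat = ct := by
            rw [hshape]
            simp [List.take_left]
          have hdropr : cs.tail.drop (((ct.length : Int)).toNat + 2) = r := by
            rw [hshape]
            simp only [Int.toNat_natCast]
            have := pvDropApp ct ('$' :: '$' :: r) 2
            simpa using this
          rw [htake, hdropr]
          split
          · rename_i span rest heq
            rw [hm] at heq
            simp at heq
            obtain ⟨h1, h2⟩ := heq
            subst h2
            rw [← h1]
            exact congrArg (fun pr => (pvPhChunk n ++ pr.1, ('$' :: '$' :: ct ++ ['$','$']) :: pr.2)) (pvSub_eq_pvRec r (n+1))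
          · rename_i heq
            rw [hm] at heq
            simp at heq
        | none =>
          have hfind := pvDDClose_none cs.tail hdd
          have hm : pvMatch ('$' :: cs) = none := by
            rw [pvMatch, if_pos rfl, if_pos hd2, hdd]
            have hsingle : pvSingle cs = none := by
              unfold pvSingle
              rcases cs with _ | ⟨x, xs⟩
              · rfl
              · simp at hd2
                subst hd2
                simp [List.takeWhile]
            rw [hsingle]
          rw [hfind]
          simp only [if_pos rfl]
          split
          · rename_i span rest heq
            rw [hm] at heq
            simp at heq
          · exact congrArg (fun pr => ('$' :: pr.1, pr.2)) (pvSub_eq_pvRec cs n)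
      · rw [if_pos rfl, if_neg hd2]
        match hs : pvSingle cs with
        | some (body, r) =>
          obtain ⟨hshape, hne, hfree⟩ := pvSingle_shape cs body r hs
          have hm : pvMatch ('$' :: cs) = some ('$' :: body ++ ['$'], r) := by
            rw [pvMatch, if_pos rfl, if_neg hd2, hs]
          have hfind : PySem.Chars.find cs ['$'] = (body.length : Int) := by
            rw [hshape, pvFindAppend body ('$' :: r) [] hfree, pvFindCons]
            simp [List.isPrefixOf]
          rw [hfind, if_neg (by omega)]
          have htake : cs.take ((body.length : Int)).toNat = body := by
            rw [hshape]
            simp [List.take_left]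
          have hdrop : cs.drop (((body.length : Int)).toNat + 1) = r := by
            rw [hshape]
            simp only [Int.toNat_natCast]
            have := pvDropApp body ('$' :: r) 1
            simpa using this
          rw [htake, hdrop]
          split
          · rename_i span rest heq
            rw [hm] at heq
            simp at heq
            obtain ⟨h1, h2⟩ := heq
            subst h2
            rw [← h1]
            exact congrArg (fun pr => (pvPhChunk n ++ pr.1, ('$' :: body ++ ['$']) :: pr.2)) (pvSub_eq_pvRec r (n+1))
          · rename_i heq
            rw [hm] at heq
            simp at heq
        | none =>
          have hfind := pvSingle_none_find cs hs hd2
          have hm : pvMatch ('$' :: cs) = none := by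
            rw [pvMatch, if_pos rfl, if_neg hd2, hs]
          rw [hfind]
          simp only [if_pos rfl]
          split
          · rename_i span rest heq
            rw [hm] at heq
            simp at heq
          · exact congrArg (fun pr => ('$' :: pr.1, pr.2)) (pvSub_eq_pvRec cs n)
  termination_by cs.length
  decreasing_by
  all_goals try simp
  all_goals (have hlen := congrArg List.length hshape;
             simp only [List.length_append, List.length_cons, List.length_tail] at hlen;
             omega)

theorem pvB_eq_pvRec (text : String) :
    protect_math_py_alt text = (String.ofList (pvRec text.toList 0).1,
      (pvRec text.toList 0).2.map String.ofList) := by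
  unfold protect_math_py_alt
  rw [pvSub_eq_pvRec]

-- ===== VERDICT (by name: the statement is the Claim_ definition above) =====
theorem protect_math_py_spec : Claim_equal_protect_math_py := by
  intro text _
  unfold Spec_protect_math_py
  rw [pvA_eq_pvRec, pvB_eq_pvRec]
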